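-- pv_equiv track=rewrite | github.com/octavia-crompton/russian-river-seepage | src/timeseries.py | sequence_lengths
-- ===== SOURCE A (Python) =====
-- from itertools import groupby
--
-- def sequence_lengths(data):
--     """
--     identify lengths of inlet closures
--     """
--     lengths = []
--     for key, group in groupby(data):
--         group_list = list(group)
--         if key == 1:
--             lengths.extend([len(group_list)] * len(group_list))
--         else:
--             lengths.extend([0] * len(group_list))
--     return lengths
-- ===== SOURCE B (Python) =====
-- def sequence_lengths(data):
--     """
--     identify lengths of inlet closures
--     """
--     data = list(data)
--     # forward pass: fwd[i] = number of consecutive 1s ending at position i (0 if data[i] != 1)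
--     fwd = []
--     run = 0
--     for x in data:
--         run = run + 1 if x == 1 else 0
--         fwd.append(run)
--     # backward pass: bwd[i] = number of consecutive 1s starting at position i
--     bwd = []
--     run = 0
--     for x in reversed(data):
--         run = run + 1 if x == 1 else 0
--         bwd.append(run)
--     bwd.reverse()
--     # combine: an element of a 1-run of length L has fwd + bwd = L + 1
--     return [f + b - 1 if x == 1 else 0 for x, f, b in zip(data, fwd, bwd)]
-- ===== Notes on version B (the rewrite author's own statement) =====
-- stated objective: alternative
-- what changed: Replaces the single groupby grouping pass (emitting each run's output group by group) with two staged run-counting passes — a forward pass counting consecutive 1s ending at each index and a backward pass counting those starting at each index — combined elementwise as fwd+bwd-1 where the element is 1, else 0.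
import Mathlib
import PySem

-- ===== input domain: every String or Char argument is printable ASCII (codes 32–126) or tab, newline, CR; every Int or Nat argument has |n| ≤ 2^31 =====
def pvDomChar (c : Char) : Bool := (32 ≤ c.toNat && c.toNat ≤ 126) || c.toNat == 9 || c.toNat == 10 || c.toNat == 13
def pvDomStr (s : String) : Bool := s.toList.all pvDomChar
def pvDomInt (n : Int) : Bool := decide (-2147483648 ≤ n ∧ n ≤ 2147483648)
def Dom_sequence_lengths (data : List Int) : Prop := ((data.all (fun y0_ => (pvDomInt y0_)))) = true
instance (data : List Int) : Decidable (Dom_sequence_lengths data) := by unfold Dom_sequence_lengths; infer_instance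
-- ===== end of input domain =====

-- B replaces A's single grouping pass (groupby over runs of equal values) by two staged
-- run-counting passes (forward and backward) combined elementwise as fwd+bwd-1: a
-- different algorithm of the same cost.

-- ===== PORT A =====
-- itertools.groupby: list of (key, group) for maximal runs of equal elements
def pyGroupby (xs : List Int) : List (Int × List Int) :=
  match xs with
  | [] => []
  | x :: rest =>
    (x, x :: rest.takeWhile (· == x)) :: pyGroupby (rest.dropWhile (· == x))
termination_by xs.length
decreasing_by simpa using Nat.lt_succ_of_le (List.length_dropWhile_le _ _)

def sequence_lengths (data : List Int) : List Int :=
  (pyGroupby data).foldl (fun lengths kg =>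
    if kg.1 == 1 then lengths ++ List.replicate kg.2.length (kg.2.length : Int)
    else lengths ++ List.replicate kg.2.length 0) []

-- ===== PORT B =====
-- one forward/backward pass: running count of consecutive 1s (reset to 0 on non-1)
def passRun (run : Int) : List Int → List Int
  | [] => []
  | x :: rest =>
    let p := if x == 1 then run + 1 else 0
    p :: passRun p rest

-- the zip comprehension: fwd + bwd - 1 where the element is 1, else 0
def combine3 : List Int → List Int → List Int → List Int
  | x :: xs, f :: fs, b :: bs => (if x == 1 then f + b - 1 else 0) :: combine3 xs fs bs
  | _, _, _ => []

def sequence_lengths_alt (data : List Int) : List Int :=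
  combine3 data (passRun 0 data) ((passRun 0 data.reverse).reverse)

-- ===== PRECONDITION & SPEC =====
def Spec_sequence_lengths (data : List Int) (out : List Int) : Prop := out = sequence_lengths_alt data
instance (data : List Int) (out : List Int) : Decidable (Spec_sequence_lengths data out) := by unfold Spec_sequence_lengths; infer_instance

-- ===== CLAIM (what is proved, stated in full; the proofs are below) =====
def Claim_equal_sequence_lengths : Prop := ∀ (data : List Int), Dom_sequence_lengths data → Spec_sequence_lengths data (sequence_lengths data)

-- ===== LEMMAS AND PROOFS =====

-- reference function (proof-only): runs of 1s emit their length, anything else a 0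
def altLoop (xs : List Int) : List Int :=
  match xs with
  | [] => []
  | x :: rest =>
    if x == 1 then
      let run := (rest.takeWhile (· == 1)).length + 1
      List.replicate run (run : Int) ++ altLoop (rest.dropWhile (· == 1))
    else
      0 :: altLoop rest
termination_by xs.length
decreasing_by
  · simpa using Nat.lt_succ_of_le (List.length_dropWhile_le _ _)
  · simp

-- the group body of A as a function (for the flatMap form of the foldl)
def groupOut (kg : Int × List Int) : List Int :=
  if kg.1 == 1 then List.replicate kg.2.length (kg.2.length : Int)
  else List.replicate kg.2.length 0

lemma altLoop_non_one_prefix (t r : List Int) (h : ∀ y ∈ t, y ≠ 1) :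
    altLoop (t ++ r) = List.replicate t.length 0 ++ altLoop r := by
  induction t with
  | nil => simp
  | cons y ts ih =>
    have hy : y ≠ 1 := h y (by simp)
    rw [List.cons_append, altLoop]
    simp only [beq_iff_eq, if_neg hy]
    rw [ih (fun z hz => h z (by simp [hz]))]
    simp [List.replicate_succ]

lemma flatMap_groupby_eq_altLoop : ∀ n (xs : List Int), xs.length ≤ n →
    (pyGroupby xs).flatMap groupOut = altLoop xs := by
  intro n
  induction n with
  | zero =>
    intro xs h
    have : xs = [] := List.eq_nil_of_length_eq_zero (Nat.le_zero.mp h)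
    subst this
    simp [pyGroupby, altLoop]
  | succ n ih =>
    intro xs h
    match xs with
    | [] => simp [pyGroupby, altLoop]
    | x :: rest =>
      rw [pyGroupby, List.flatMap_cons]
      by_cases hx : x = 1
      · subst hx
        rw [altLoop]
        simp only [groupOut, beq_iff_eq]
        have hlen : (rest.dropWhile (· == (1:Int))).length ≤ n := by
          have := List.length_dropWhile_le (· == (1:Int)) rest
          simp at h; omega
        rw [ih _ hlen]
        simp [Nat.add_comm]
      · rw [altLoop]
        simp only [groupOut, beq_iff_eq, if_neg hx]
        have hmem : ∀ y ∈ rest.takeWhile (· == x), y ≠ 1 := by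
          intro y hy
          have := List.mem_takeWhile_imp hy
          simp at this; omega
        have hsplit : rest = rest.takeWhile (· == x) ++ rest.dropWhile (· == x) :=
          (List.takeWhile_append_dropWhile).symm
        conv_rhs => rw [hsplit]
        rw [altLoop_non_one_prefix _ _ hmem]
        have hlen : (rest.dropWhile (· == x)).length ≤ n := by
          have := List.length_dropWhile_le (· == x) rest
          simp at h; omega
        rw [ih _ hlen]
        simp [List.replicate_succ]

-- ================== B-side lemmas ==================

lemma dropWhile_head_not (p : Int → Bool) :
    ∀ (l : List Int) (y : Int) (r : List Int), l.dropWhile p = y :: r → p y = false := by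
  intro l
  induction l with
  | nil => intro y r h; simp [List.dropWhile] at h
  | cons z l' ih =>
    intro y r h
    rw [List.dropWhile_cons] at h
    split at h
    · exact ih y r h
    · cases h; simpa using ‹¬ p z = true›

lemma passRun_append_cons (l : List Int) :
    ∀ (p : Int) (y : Int) (m : List Int), y ≠ 1 →
      passRun p (l ++ y :: m) = passRun p l ++ passRun 0 (y :: m) := by
  induction l with
  | nil => intro p y m hy; simp [passRun, hy]
  | cons z l' ih =>
    intro p y m hy
    simp only [List.cons_append, passRun]
    rw [ih _ _ _ hy]
    simp [passRun]

lemma passRun_ones (t : List Int) :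
    ∀ (p : Int), (∀ y ∈ t, y = 1) →
      passRun p t = (List.range t.length).map (fun i : Nat => p + i + 1) := by
  induction t with
  | nil => intro p _; simp [passRun]
  | cons y t' ih =>
    intro p h
    have hy : y = 1 := h y (by simp)
    rw [passRun]
    simp only [hy, beq_self_eq_true, if_pos]
    rw [ih (p + 1) (fun z hz => h z (by simp [hz]))]
    rw [List.length_cons, List.range_succ_eq_map, List.map_cons, List.map_map]
    congr 1
    · push_cast; ring
    · apply List.map_congr_left
      intro i _
      simp [Function.comp]
      ring

lemma revA (k : Nat) :
    (((List.range k).map (fun i : Nat => (0:Int) + i + 1)).reverse)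
      = (List.range k).map (fun i : Nat => (k:Int) - i) := by
  apply List.ext_getElem
  · simp
  · intro i h1 h2
    simp only [List.length_reverse, List.length_map, List.length_range] at h1 h2
    rw [List.getElem_reverse]
    simp only [List.getElem_map, List.getElem_range, List.length_map, List.length_range]
    omega

lemma combine3_append (l1 : List Int) :
    ∀ (l2 l3 m1 m2 m3 : List Int), l1.length = l2.length → l1.length = l3.length →
      combine3 (l1 ++ m1) (l2 ++ m2) (l3 ++ m3) = combine3 l1 l2 l3 ++ combine3 m1 m2 m3 := by
  induction l1 with
  | nil =>
    intro l2 l3 m1 m2 m3 h12 h13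
    have : l2 = [] := List.eq_nil_of_length_eq_zero h12.symm
    have h3 : l3 = [] := List.eq_nil_of_length_eq_zero h13.symm
    subst this; subst h3; simp [combine3]
  | cons x xs ih =>
    intro l2 l3 m1 m2 m3 h12 h13
    cases l2 with
    | nil => simp at h12
    | cons f fs =>
      cases l3 with
      | nil => simp at h13
      | cons b bs =>
        simp only [List.cons_append, combine3]
        rw [ih fs bs m1 m2 m3 (by simpa using h12) (by simpa using h13)]

lemma combine3_const (t : List Int) :
    ∀ (a b : Int), (∀ y ∈ t, y = 1) →
      combine3 t ((List.range t.length).map (fun i : Nat => a + i + 1))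
        ((List.range t.length).map (fun i : Nat => b - i))
        = List.replicate t.length (a + b) := by
  induction t with
  | nil => intro a b _; simp [combine3]
  | cons y t' ih =>
    intro a b h
    have hy : y = 1 := h y (by simp)
    rw [List.length_cons, List.range_succ_eq_map, List.map_cons, List.map_cons,
      List.map_map, List.map_map, combine3]
    simp only [hy, beq_self_eq_true, if_pos]
    have e2 : ((List.range t'.length).map (Nat.succ)).map (fun i : Nat => a + i + 1)
        = (List.range t'.length).map (fun i : Nat => (a + 1) + i + 1) := by
      rw [List.map_map]; apply List.map_congr_left; intro i _
      simp [Function.comp]; ring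
    have e3 : ((List.range t'.length).map (Nat.succ)).map (fun i : Nat => b - i)
        = (List.range t'.length).map (fun i : Nat => (b - 1) - i) := by
      rw [List.map_map]; apply List.map_congr_left; intro i _
      simp [Function.comp]; ring
    rw [List.map_map] at e2 e3
    rw [e2, e3, ih (a + 1) (b - 1) (fun z hz => h z (by simp [hz]))]
    rw [List.replicate_succ]
    congr 1
    · push_cast; ring
    · congr 1; ring

lemma passRun_run_append (p : Int) (t r : List Int) (hall : ∀ y ∈ t, y = 1)
    (hr : r = [] ∨ ∃ y r', r = y :: r' ∧ y ≠ 1) :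
    passRun p (t ++ r) = (List.range t.length).map (fun i : Nat => p + i + 1) ++ passRun 0 r := by
  rcases hr with hr | ⟨y, r', hr, hy⟩
  · subst hr; simp [passRun, passRun_ones t p hall]
  · subst hr
    rw [passRun_append_cons _ _ _ _ hy, passRun_ones t p hall]

lemma passRun_rev_append (t r : List Int) (hall : ∀ y ∈ t, y = 1)
    (hr : r = [] ∨ ∃ y r', r = y :: r' ∧ y ≠ 1) :
    passRun 0 (r.reverse ++ t)
      = passRun 0 r.reverse ++ (List.range t.length).map (fun i : Nat => (0:Int) + i + 1) := by
  rcases hr with hr | ⟨y, r', hr, hy⟩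
  · subst hr; simp [passRun, passRun_ones t 0 hall]
  · subst hr
    rw [List.reverse_cons, List.append_assoc, List.singleton_append,
      passRun_append_cons _ _ _ _ hy, passRun_append_cons _ _ _ _ hy]
    have h1 : passRun 0 (y :: t) = 0 :: passRun 0 t := by simp [passRun, hy]
    have h2 : passRun 0 [y] = [(0:Int)] := by simp [passRun, hy]
    rw [h1, h2, passRun_ones t 0 hall]
    simp

lemma alt_run (t r : List Int) (hall : ∀ y ∈ t, y = 1)
    (hr : r = [] ∨ ∃ y r', r = y :: r' ∧ y ≠ 1)
    (IH : combine3 r (passRun 0 r) ((passRun 0 r.reverse).reverse) = altLoop r) :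
    combine3 (t ++ r) (passRun 0 (t ++ r)) ((passRun 0 (t ++ r).reverse).reverse)
      = List.replicate t.length (t.length : Int) ++ altLoop r := by
  have hallrev : ∀ y ∈ t.reverse, y = 1 := fun y hy => hall y (List.mem_reverse.mp hy)
  have hfwd := passRun_run_append 0 t r hall hr
  have hbwd : passRun 0 ((t ++ r).reverse)
      = passRun 0 r.reverse ++ (List.range t.length).map (fun i : Nat => (0:Int) + i + 1) := by
    rw [List.reverse_append]
    have := passRun_rev_append t.reverse r hallrev hr
    simpa using this
  rw [hfwd, hbwd, List.reverse_append, revA]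
  rw [combine3_append _ _ _ _ _ _ (by simp) (by simp)]
  have hc := combine3_const t 0 (t.length : Int) hall
  rw [hc, IH]
  congr 2
  ring

lemma alt_eq_altLoop : ∀ (n : Nat) (xs : List Int), xs.length ≤ n →
    combine3 xs (passRun 0 xs) ((passRun 0 xs.reverse).reverse) = altLoop xs := by
  intro n
  induction n with
  | zero =>
    intro xs h
    have : xs = [] := List.eq_nil_of_length_eq_zero (Nat.le_zero.mp h)
    subst this; simp [combine3, altLoop]
  | succ n ih =>
    intro xs h
    match xs with
    | [] => simp [combine3, altLoop]
    | x :: rest =>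
      by_cases hx : x = 1
      · subst hx
        have hall : ∀ y ∈ (1:Int) :: rest.takeWhile (· == (1:Int)), y = 1 := by
          intro y hy
          rcases List.mem_cons.mp hy with h1 | h2
          · exact h1
          · have := List.mem_takeWhile_imp h2; simpa using this
        have hr : rest.dropWhile (· == (1:Int)) = [] ∨
            ∃ y r', rest.dropWhile (· == (1:Int)) = y :: r' ∧ y ≠ 1 := by
          cases hd : rest.dropWhile (· == (1:Int)) with
          | nil => exact Or.inl rfl
          | cons y r' =>
            refine Or.inr ⟨y, r', rfl, ?_⟩
            have := dropWhile_head_not (· == (1:Int)) rest y r' hd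
            simpa using this
        have hlenr : (rest.dropWhile (· == (1:Int))).length ≤ n := by
          have := List.length_dropWhile_le (· == (1:Int)) rest
          simp at h; omega
        have hmain := alt_run ((1:Int) :: rest.takeWhile (· == (1:Int)))
          (rest.dropWhile (· == (1:Int))) hall hr (ih _ hlenr)
        have hdata : (1:Int) :: rest
            = ((1:Int) :: rest.takeWhile (· == (1:Int))) ++ rest.dropWhile (· == (1:Int)) := by
          simp
        calc combine3 ((1:Int) :: rest) (passRun 0 ((1:Int) :: rest))
                ((passRun 0 ((1:Int) :: rest).reverse).reverse)
            = List.replicate ((1:Int) :: rest.takeWhile (· == (1:Int))).length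
                ((((1:Int) :: rest.takeWhile (· == (1:Int))).length : Nat) : Int)
                ++ altLoop (rest.dropWhile (· == (1:Int))) := by
              rw [hdata]; exact hmain
          _ = altLoop ((1:Int) :: rest) := by
              rw [altLoop]
              simp [List.length_cons, Nat.add_comm]
      · -- non-1 head: one element at a time
        have h1 : passRun 0 (x :: rest) = 0 :: passRun 0 rest := by simp [passRun, hx]
        have h2 : passRun 0 ((x :: rest).reverse) = passRun 0 rest.reverse ++ [0] := by
          rw [List.reverse_cons, show ([x] : List Int) = x :: [] from rfl,
            passRun_append_cons _ _ _ _ hx]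
          simp [passRun, hx]
        rw [h1, h2, List.reverse_append]
        simp only [List.reverse_cons, List.reverse_nil, List.nil_append, List.singleton_append]
        rw [combine3, altLoop]
        simp only [beq_iff_eq, if_neg hx]
        have : rest.length ≤ n := by simp at h; omega
        rw [ih rest this]

-- ===== VERDICT (by name: the statement is the Claim_ definition above) =====
theorem sequence_lengths_spec : Claim_equal_sequence_lengths := by
  intro data _
  unfold Spec_sequence_lengths sequence_lengths sequence_lengths_alt
  have hlam : (fun (lengths : List Int) (kg : Int × List Int) =>
      if kg.1 == 1 then lengths ++ List.replicate kg.2.length (kg.2.length : Int)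
      else lengths ++ List.replicate kg.2.length 0)
      = fun lengths kg => lengths ++ groupOut kg := by
    funext l kg
    by_cases hk : kg.1 = 1 <;> simp [groupOut, hk]
  rw [hlam, PySem.List.foldl_append_eq_flatMap, List.nil_append,
    flatMap_groupby_eq_altLoop data.length data le_rfl,
    ← alt_eq_altLoop data.length data le_rfl]
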